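-- pv_equiv track=rewrite | github.com/martimdLima/algorithms | algorithms/graph_algorithms/depth_first_search_(DFS)/depth_first_search.py | dfs_search_graph_recursive
-- ===== SOURCE A (Python) =====
-- def dfs_search_graph_recursive(graph: dict, start: int, target: int) -> int:
--     """
--     Searches for a target element in a graph using recursive DFS.
--
--     Args:
--     graph (dict): The adjacency list of the graph.
--     start (int): The starting node for the DFS traversal.
--     target (int): The element to search for.
--
--     Returns:
--     int: The node identifier where the target is found, or None if not found.
--
--     Example:
--     --------
--     graph = {
--         0: [1, 2],
--         1: [0, 3, 4],
--         2: [0, 4],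
--         3: [1, 5],
--         4: [1, 2],
--         5: [3]
--     }
--     >>> dfs_search_graph_recursive(graph, 0, 5)
--     5
--
--     >>> dfs_search_graph_recursive(graph, 0, 6)
--     None
--     """
--
--     def dfs(node, visited):
--         if node == target:
--             return node
--         visited.add(node)
--         for neighbor in graph.get(node, []):
--             if neighbor not in visited:
--                 result = dfs(neighbor, visited)
--                 if result is not None:
--                     return result
--         return None
--
--     visited = set()
--     return dfs(start, visited)
-- ===== SOURCE B (Python) =====
-- def dfs_search_graph_recursive(graph: dict, start: int, target: int) -> int:
--     reachable = {start}
--     frontier = [start]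
--     while frontier:
--         next_frontier = []
--         for u in frontier:
--             for v in graph.get(u, []):
--                 if v not in reachable:
--                     reachable.add(v)
--                     next_frontier.append(v)
--         frontier = next_frontier
--     return target if target in reachable else None
-- ===== Notes on version B (the rewrite author's own statement) =====
-- stated objective: alternative
-- what changed: Replaces the recursive target-checking DFS (shared mutable visited set, early return) with an iterative level-by-level frontier closure that first computes the full reachable set and then tests target membership; the answer depends only on reachability, so the values agree.
import Mathlib
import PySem

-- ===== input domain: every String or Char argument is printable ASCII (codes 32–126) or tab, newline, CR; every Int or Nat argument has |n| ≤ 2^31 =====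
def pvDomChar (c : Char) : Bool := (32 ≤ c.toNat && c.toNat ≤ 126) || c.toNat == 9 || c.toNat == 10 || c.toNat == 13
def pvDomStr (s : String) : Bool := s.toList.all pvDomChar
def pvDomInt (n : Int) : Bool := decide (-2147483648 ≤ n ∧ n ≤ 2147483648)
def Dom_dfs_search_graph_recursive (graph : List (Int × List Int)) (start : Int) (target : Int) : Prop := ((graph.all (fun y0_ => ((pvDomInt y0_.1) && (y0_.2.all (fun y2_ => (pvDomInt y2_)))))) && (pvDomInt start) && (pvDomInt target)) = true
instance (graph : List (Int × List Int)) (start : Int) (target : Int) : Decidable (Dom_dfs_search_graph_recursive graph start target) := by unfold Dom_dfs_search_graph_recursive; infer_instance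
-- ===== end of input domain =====

-- B replaces the recursive DFS by an iterative frontier closure computing the whole
-- reachable set first; both return the target iff it is reachable (objective: alternative).

-- graph.get(node, []) (both Pythons use it)
def pvNbrs (graph : List (Int × List Int)) (node : Int) : List Int :=
  (PySem.Dict.mk graph).getD node []

-- universe of candidate nodes (start plus every adjacency-list entry); bounds both fuels
def pvUniv (graph : List (Int × List Int)) (start : Int) : List Int :=
  PySem.List.dedup (start :: graph.flatMap (fun p => p.2))

-- ===== PORT A =====
-- recursive dfs(node, visited) with the shared visited set; fuel (provably sufficient:
-- each nested call starts with a strictly larger visited ⊆ pvUniv) models Python's recursion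
mutual
def pvDfsA (graph : List (Int × List Int)) (target : Int) :
    Nat → Int → PySem.Set Int → Option Int × PySem.Set Int
  | 0, _, V => (none, V)
  | f+1, node, V =>
    if node = target then (some node, V)
    else pvDfsALoop graph target f (pvNbrs graph node) (PySem.Set.add V node)
  termination_by f _ _ => (f, 0)

-- the 'for neighbor in graph.get(node, []):' loop of dfs
def pvDfsALoop (graph : List (Int × List Int)) (target : Int) (f : Nat) :
    List Int → PySem.Set Int → Option Int × PySem.Set Int
  | [], V => (none, V)
  | n :: ns, V =>
    if n ∈ V then pvDfsALoop graph target f ns V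
    else
      match pvDfsA graph target f n V with
      | (some r, W) => (some r, W)
      | (none, W) => pvDfsALoop graph target f ns W
  termination_by ns _ => (f, ns.length + 1)
end

def dfs_search_graph_recursive (graph : List (Int × List Int)) (start : Int) (target : Int) : Option Int :=
  (pvDfsA graph target ((pvUniv graph start).length + 1) start PySem.Set.empty).1

-- ===== PORT B =====
-- 'for v in graph.get(u, []): if v not in reachable: add v, append v'
def pvVisitNbrs : List Int → PySem.Set Int → List Int → PySem.Set Int × List Int
  | [], R, nf => (R, nf)
  | v :: vs, R, nf =>
    if v ∈ R then pvVisitNbrs vs R nf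
    else pvVisitNbrs vs (PySem.Set.add R v) (nf ++ [v])

-- 'for u in frontier:'
def pvVisitRound (graph : List (Int × List Int)) :
    List Int → PySem.Set Int → List Int → PySem.Set Int × List Int
  | [], R, nf => (R, nf)
  | u :: us, R, nf =>
    pvVisitRound graph us (pvVisitNbrs (pvNbrs graph u) R nf).1 (pvVisitNbrs (pvNbrs graph u) R nf).2

-- 'while frontier:' (fuel provably sufficient: reachable grows every productive round)
def pvLoopB (graph : List (Int × List Int)) :
    Nat → List Int → PySem.Set Int → PySem.Set Int
  | 0, _, R => R
  | f+1, frontier, R =>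
    if frontier = [] then R
    else pvLoopB graph f (pvVisitRound graph frontier R []).2 (pvVisitRound graph frontier R []).1

def dfs_search_graph_recursive_alt (graph : List (Int × List Int)) (start : Int) (target : Int) : Option Int :=
  let reachable := pvLoopB graph ((pvUniv graph start).length + 1) [start] (PySem.Set.add PySem.Set.empty start)
  if target ∈ reachable then some target else none

-- ===== PRECONDITION & SPEC =====
def Spec_dfs_search_graph_recursive (graph : List (Int × List Int)) (start : Int) (target : Int) (out : Option Int) : Prop := out = dfs_search_graph_recursive_alt graph start target
instance (graph : List (Int × List Int)) (start : Int) (target : Int) (out : Option Int) : Decidable (Spec_dfs_search_graph_recursive graph start target out) := by unfold Spec_dfs_search_graph_recursive; infer_instance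

-- ===== CLAIM (what is proved, stated in full; the proofs are below) =====
def Claim_equal_dfs_search_graph_recursive : Prop := ∀ (graph : List (Int × List Int)) (start : Int) (target : Int), Dom_dfs_search_graph_recursive graph start target → Spec_dfs_search_graph_recursive graph start target (dfs_search_graph_recursive graph start target)

-- ===== LEMMAS AND PROOFS =====

-- reachability in the adjacency structure; both programs return `some target` iff it holds
def pvReach (graph : List (Int × List Int)) (a b : Int) : Prop :=
  Relation.ReflTransGen (fun u v => v ∈ pvNbrs graph u) a b

-- number of universe nodes not yet visited (the fuel bound)
def pvRem (graph : List (Int × List Int)) (start : Int) (V : PySem.Set Int) : Nat :=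
  (pvUniv graph start).countP (fun x => decide (x ∉ V))

lemma pvNbrs_cases (graph : List (Int × List Int)) (u : Int) :
    pvNbrs graph u = [] ∨ ∃ p ∈ graph, pvNbrs graph u = p.2 := by
  induction graph with
  | nil => left; simp [pvNbrs, PySem.Dict.getD, PySem.Dict.get?]
  | cons p rest ih =>
    obtain ⟨k, v⟩ := p
    have hstep : pvNbrs ((k, v) :: rest) u =
        if k == u then v else pvNbrs rest u := by
      simp [pvNbrs, PySem.Dict.getD, PySem.Dict.get?_mk_cons]
      split <;> rfl
    by_cases h : k == u
    · right; exact ⟨(k, v), List.mem_cons_self, by rw [hstep, if_pos h]⟩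
    · rw [hstep, if_neg h]
      rcases ih with h0 | ⟨q, hq, he⟩
      · left; exact h0
      · right; exact ⟨q, List.mem_cons_of_mem _ hq, he⟩

lemma pvNbrs_subset_univ (graph : List (Int × List Int)) (start u y : Int)
    (h : y ∈ pvNbrs graph u) : y ∈ pvUniv graph start := by
  rcases pvNbrs_cases graph u with h0 | ⟨p, hp, he⟩
  · rw [h0] at h; cases h
  · rw [he] at h
    rw [pvUniv, PySem.List.mem_dedup]
    exact List.mem_cons_of_mem _ (List.mem_flatMap.mpr ⟨p, hp, h⟩)

lemma start_mem_univ (graph : List (Int × List Int)) (start : Int) :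
    start ∈ pvUniv graph start := by
  rw [pvUniv, PySem.List.mem_dedup]; exact List.mem_cons_self

lemma pvRem_mono (graph : List (Int × List Int)) (start : Int) (V W : PySem.Set Int)
    (h : ∀ x ∈ V, x ∈ W) : pvRem graph start W ≤ pvRem graph start V := by
  unfold pvRem
  apply List.countP_mono_left
  intro x _ hx
  simp only [decide_eq_true_eq] at hx ⊢
  exact fun hxV => hx (h x hxV)

lemma countP_notMem_lt (V W : List Int) (x : Int)
    (hsub : ∀ y ∈ V, y ∈ W) (hxW : x ∈ W) (hxV : x ∉ V) :
    ∀ (l : List Int), x ∈ l →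
      l.countP (fun z => decide (z ∉ W)) < l.countP (fun z => decide (z ∉ V)) := by
  intro l hl
  simp only [decide_not]
  induction l with
  | nil => cases hl
  | cons a l ih =>
    have hle : l.countP (fun z => !decide (z ∈ W)) ≤ l.countP (fun z => !decide (z ∈ V)) := by
      apply List.countP_mono_left
      intro z _ hz
      simp only [Bool.not_eq_eq_eq_not, Bool.not_true, decide_eq_false_iff_not] at hz ⊢
      exact fun hzV => hz (hsub z hzV)
    rcases List.mem_cons.mp hl with heq | hmem
    · subst heq
      simp only [List.countP_cons]
      simp [hxW, hxV]
      omega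
    · have hlt := ih hmem
      simp only [List.countP_cons]
      by_cases hw : a ∈ W
      · by_cases hv : a ∈ V <;> simp [hw, hv] <;> omega
      · have hv : a ∉ V := fun hv => hw (hsub a hv)
        simp [hw, hv]
        omega

lemma pvRem_lt (graph : List (Int × List Int)) (start : Int) (V W : PySem.Set Int) (x : Int)
    (hsub : ∀ y ∈ V, y ∈ W) (hxW : x ∈ W) (hxV : x ∉ V) (hxU : x ∈ pvUniv graph start) :
    pvRem graph start W < pvRem graph start V := by
  exact countP_notMem_lt V W x hsub hxW hxV _ hxU

lemma reach_closed (graph : List (Int × List Int)) (W : PySem.Set Int) (a b : Int)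
    (h : pvReach graph a b) (ha : a ∈ W)
    (hcl : ∀ v ∈ W, ∀ y ∈ pvNbrs graph v, y ∈ W) : b ∈ W := by
  revert ha
  induction h using Relation.ReflTransGen.head_induction_on with
  | refl => exact fun hb => hb
  | head h' _ ih => exact fun ha' => ih (hcl _ ha' _ h')

lemma pvDfsA_sound : ∀ (f : Nat) (graph : List (Int × List Int)) (target node : Int)
    (V W : PySem.Set Int) (r : Int),
    pvDfsA graph target f node V = (some r, W) → r = target ∧ pvReach graph node target := by
  intro f
  induction f with
  | zero =>
    intro graph target node V W r h
    simp [pvDfsA] at h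
  | succ f ih =>
    have loopS : ∀ (graph : List (Int × List Int)) (target : Int) (ns : List Int)
        (V W : PySem.Set Int) (r : Int),
        pvDfsALoop graph target f ns V = (some r, W) →
        r = target ∧ ∃ n ∈ ns, pvReach graph n target := by
      intro graph target ns
      induction ns with
      | nil => intro V W r h; simp [pvDfsALoop] at h
      | cons n ns ihns =>
        intro V W r h
        simp only [pvDfsALoop] at h
        by_cases hmem : n ∈ V
        · rw [if_pos hmem] at h
          obtain ⟨hrt, m, hm, hr⟩ := ihns V W r h
          exact ⟨hrt, m, List.mem_cons_of_mem _ hm, hr⟩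
        · rw [if_neg hmem] at h
          rcases hrec : pvDfsA graph target f n V with ⟨ro, W1⟩
          rw [hrec] at h
          cases ro with
          | some r1 =>
            simp only [Prod.mk.injEq, Option.some.injEq] at h
            obtain ⟨hr1, -⟩ := h
            obtain ⟨hrt, hre⟩ := ih graph target n V W1 r1 hrec
            exact ⟨hr1 ▸ hrt, n, List.mem_cons_self, hre⟩
          | none =>
            obtain ⟨hrt, m, hm, hr⟩ := ihns W1 W r h
            exact ⟨hrt, m, List.mem_cons_of_mem _ hm, hr⟩
    intro graph target node V W r h
    simp only [pvDfsA] at h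
    by_cases hnt : node = target
    · rw [if_pos hnt] at h
      simp only [Prod.mk.injEq, Option.some.injEq] at h
      exact ⟨h.1 ▸ hnt, hnt ▸ Relation.ReflTransGen.refl⟩
    · rw [if_neg hnt] at h
      obtain ⟨hrt, n, hn, hr⟩ := loopS graph target _ _ _ _ h
      exact ⟨hrt, Relation.ReflTransGen.head hn hr⟩

lemma pvDfsALoop_none (graph : List (Int × List Int)) (start target : Int) (f : Nat)
    (ih : ∀ (node : Int) (V W : PySem.Set Int),
      pvRem graph start V < f → node ∈ pvUniv graph start → node ∉ V → target ∉ V →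
      (∀ x ∈ V, x ∈ pvUniv graph start) → pvDfsA graph target f node V = (none, W) →
      (∀ x ∈ V, x ∈ W) ∧ node ∈ W ∧ target ∉ W ∧ (∀ x ∈ W, x ∈ pvUniv graph start) ∧
      (∀ v ∈ W, v ∉ V → ∀ y ∈ pvNbrs graph v, y ∈ W)) :
    ∀ (ns : List Int) (V W : PySem.Set Int),
      pvRem graph start V < f → target ∉ V → (∀ x ∈ V, x ∈ pvUniv graph start) →
      (∀ n ∈ ns, n ∈ pvUniv graph start) →
      pvDfsALoop graph target f ns V = (none, W) →
      (∀ x ∈ V, x ∈ W) ∧ target ∉ W ∧ (∀ x ∈ W, x ∈ pvUniv graph start) ∧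
      (∀ n ∈ ns, n ∈ W) ∧ (∀ v ∈ W, v ∉ V → ∀ y ∈ pvNbrs graph v, y ∈ W) := by
  intro ns
  induction ns with
  | nil =>
    intro V W hf htV hVU _ h
    simp only [pvDfsALoop, Prod.mk.injEq, true_and] at h
    subst h
    exact ⟨fun x hx => hx, htV, hVU, by simp, fun v hv hvV => absurd hv hvV⟩
  | cons n ns ihns =>
    intro V W hf htV hVU hns h
    simp only [pvDfsALoop] at h
    by_cases hmem : n ∈ V
    · rw [if_pos hmem] at h
      obtain ⟨c1, c2, c3, c4, c5⟩ :=
        ihns V W hf htV hVU (fun m hm => hns m (List.mem_cons_of_mem _ hm)) h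
      refine ⟨c1, c2, c3, fun m hm => ?_, c5⟩
      rcases List.mem_cons.mp hm with rfl | hm'
      · exact c1 m hmem
      · exact c4 m hm'
    · rw [if_neg hmem] at h
      rcases hrec : pvDfsA graph target f n V with ⟨ro, W1⟩
      rw [hrec] at h
      cases ro with
      | some r1 => simp at h
      | none =>
        obtain ⟨a1, a2, a3, a4, a5⟩ :=
          ih n V W1 hf (hns n List.mem_cons_self) hmem htV hVU hrec
        have hf1 : pvRem graph start W1 < f :=
          lt_of_le_of_lt (pvRem_mono graph start V W1 a1) hf
        obtain ⟨b1, b2, b3, b4, b5⟩ :=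
          ihns W1 W hf1 a3 a4 (fun m hm => hns m (List.mem_cons_of_mem _ hm)) h
        refine ⟨fun x hx => b1 x (a1 x hx), b2, b3, fun m hm => ?_, ?_⟩
        · rcases List.mem_cons.mp hm with rfl | hm'
          · exact b1 m a2
          · exact b4 m hm'
        · intro v hv hvV y hy
          by_cases hv1 : v ∈ W1
          · exact b1 y (a5 v hv1 hvV y hy)
          · exact b5 v hv hv1 y hy

lemma pvDfsA_none : ∀ (f : Nat) (graph : List (Int × List Int)) (start target node : Int)
    (V W : PySem.Set Int),
    pvRem graph start V < f → node ∈ pvUniv graph start → node ∉ V → target ∉ V →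
    (∀ x ∈ V, x ∈ pvUniv graph start) → pvDfsA graph target f node V = (none, W) →
    (∀ x ∈ V, x ∈ W) ∧ node ∈ W ∧ target ∉ W ∧ (∀ x ∈ W, x ∈ pvUniv graph start) ∧
    (∀ v ∈ W, v ∉ V → ∀ y ∈ pvNbrs graph v, y ∈ W) := by
  intro f
  induction f with
  | zero =>
    intro graph start target node V W hf _ _ _ _ _
    exact absurd hf (Nat.not_lt_zero _)
  | succ f ih =>
    intro graph start target node V W hf hnU hnV htV hVU h
    by_cases hnt : node = target
    · simp [pvDfsA, hnt] at h
    · simp only [pvDfsA, if_neg hnt] at h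
      have hsubadd : ∀ y ∈ V, y ∈ PySem.Set.add V node :=
        fun y hy => (PySem.Set.mem_add _ _ _).mpr (Or.inl hy)
      have hnadd : node ∈ PySem.Set.add V node := (PySem.Set.mem_add _ _ _).mpr (Or.inr rfl)
      have hVN : ∀ x ∈ PySem.Set.add V node, x ∈ pvUniv graph start := by
        intro x hx
        rcases (PySem.Set.mem_add _ _ _).mp hx with hx' | rfl
        · exact hVU x hx'
        · exact hnU
      have hrem1 : pvRem graph start (PySem.Set.add V node) < f := by
        have := pvRem_lt graph start V (PySem.Set.add V node) node hsubadd hnadd hnV hnU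
        omega
      have htV1 : target ∉ PySem.Set.add V node := by
        intro hx
        rcases (PySem.Set.mem_add _ _ _).mp hx with hx' | hx'
        · exact htV hx'
        · exact hnt hx'.symm
      obtain ⟨b1, b2, b3, b4, b5⟩ :=
        pvDfsALoop_none graph start target f (ih graph start target)
          (pvNbrs graph node) (PySem.Set.add V node) W hrem1 htV1 hVN
          (fun y hy => pvNbrs_subset_univ graph start node y hy) h
      refine ⟨fun x hx => b1 x (hsubadd x hx), b1 node hnadd, b2, b3, ?_⟩
      intro v hv hvV y hy
      by_cases hveq : v = node
      · exact b4 y (hveq ▸ hy)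
      · refine b5 v hv ?_ y hy
        intro hmem'
        rcases (PySem.Set.mem_add _ _ _).mp hmem' with hx' | hx'
        · exact hvV hx'
        · exact hveq hx' 

lemma pvVisitNbrs_spec : ∀ (vs : List Int) (R : PySem.Set Int) (nf : List Int),
    (∀ x ∈ R, x ∈ (pvVisitNbrs vs R nf).1) ∧
    (∀ x ∈ vs, x ∈ (pvVisitNbrs vs R nf).1) ∧
    (∀ x ∈ nf, x ∈ (pvVisitNbrs vs R nf).2) ∧
    (∀ x ∈ (pvVisitNbrs vs R nf).1, x ∈ R ∨ x ∈ vs) ∧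
    (∀ x ∈ (pvVisitNbrs vs R nf).1, x ∈ R ∨ x ∈ (pvVisitNbrs vs R nf).2) ∧
    (∀ x ∈ (pvVisitNbrs vs R nf).2, x ∈ nf ∨ x ∈ (pvVisitNbrs vs R nf).1) ∧
    (∀ x ∈ (pvVisitNbrs vs R nf).2, x ∈ nf ∨ x ∉ R) := by
  intro vs
  induction vs with
  | nil =>
    intro R nf
    simp only [pvVisitNbrs]
    exact ⟨fun x hx => hx, by simp, fun x hx => hx, fun x hx => Or.inl hx,
      fun x hx => Or.inl hx, fun x hx => Or.inl hx, fun x hx => Or.inl hx⟩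
  | cons v vs ih =>
    intro R nf
    simp only [pvVisitNbrs]
    by_cases hv : v ∈ R
    · rw [if_pos hv]
      obtain ⟨c1, c2, c3, c4, c5, c6, c7⟩ := ih R nf
      refine ⟨c1, fun x hx => ?_, c3, fun x hx => ?_, c5, c6, c7⟩
      · rcases List.mem_cons.mp hx with rfl | hx'
        · exact c1 x hv
        · exact c2 x hx'
      · rcases c4 x hx with h | h
        · exact Or.inl h
        · exact Or.inr (List.mem_cons_of_mem _ h)
    · rw [if_neg hv]
      obtain ⟨c1, c2, c3, c4, c5, c6, c7⟩ := ih (PySem.Set.add R v) (nf ++ [v])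
      have hRsub : ∀ x ∈ R, x ∈ PySem.Set.add R v :=
        fun x hx => (PySem.Set.mem_add _ _ _).mpr (Or.inl hx)
      have hvadd : v ∈ PySem.Set.add R v := (PySem.Set.mem_add _ _ _).mpr (Or.inr rfl)
      refine ⟨fun x hx => c1 x (hRsub x hx), fun x hx => ?_, fun x hx => c3 x (by simp [hx]),
        fun x hx => ?_, fun x hx => ?_, fun x hx => ?_, fun x hx => ?_⟩
      · rcases List.mem_cons.mp hx with rfl | hx'
        · exact c1 x hvadd
        · exact c2 x hx'
      · rcases c4 x hx with h | h
        · rcases (PySem.Set.mem_add _ _ _).mp h with h' | rfl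
          · exact Or.inl h'
          · exact Or.inr List.mem_cons_self
        · exact Or.inr (List.mem_cons_of_mem _ h)
      · rcases c5 x hx with h | h
        · rcases (PySem.Set.mem_add _ _ _).mp h with h' | rfl
          · exact Or.inl h'
          · exact Or.inr (c3 x (by simp))
        · exact Or.inr h
      · rcases c6 x hx with h | h
        · rcases List.mem_append.mp h with h' | h'
          · exact Or.inl h'
          · have : x = v := by simpa using h'
            exact Or.inr (c1 x (this ▸ hvadd))
        · exact Or.inr h
      · rcases c7 x hx with h | h
        · rcases List.mem_append.mp h with h' | h'
          · exact Or.inl h'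
          · have : x = v := by simpa using h'
            exact Or.inr (this ▸ hv)
        · exact Or.inr fun hxR => h (hRsub x hxR)

lemma pvVisitRound_spec (graph : List (Int × List Int)) :
    ∀ (us : List Int) (R : PySem.Set Int) (nf : List Int),
    (∀ x ∈ R, x ∈ (pvVisitRound graph us R nf).1) ∧
    (∀ u ∈ us, ∀ y ∈ pvNbrs graph u, y ∈ (pvVisitRound graph us R nf).1) ∧
    (∀ x ∈ nf, x ∈ (pvVisitRound graph us R nf).2) ∧
    (∀ x ∈ (pvVisitRound graph us R nf).1, x ∈ R ∨ ∃ u ∈ us, x ∈ pvNbrs graph u) ∧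
    (∀ x ∈ (pvVisitRound graph us R nf).1, x ∈ R ∨ x ∈ (pvVisitRound graph us R nf).2) ∧
    (∀ x ∈ (pvVisitRound graph us R nf).2, x ∈ nf ∨ x ∈ (pvVisitRound graph us R nf).1) ∧
    (∀ x ∈ (pvVisitRound graph us R nf).2, x ∈ nf ∨ x ∉ R) := by
  intro us
  induction us with
  | nil =>
    intro R nf
    simp only [pvVisitRound]
    exact ⟨fun x hx => hx, by simp, fun x hx => hx, fun x hx => Or.inl hx,
      fun x hx => Or.inl hx, fun x hx => Or.inl hx, fun x hx => Or.inl hx⟩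
  | cons u us ih =>
    intro R nf
    simp only [pvVisitRound]
    obtain ⟨c1, c2, c3, c4, c5, c6, c7⟩ := pvVisitNbrs_spec (pvNbrs graph u) R nf
    obtain ⟨d1, d2, d3, d4, d5, d6, d7⟩ :=
      ih (pvVisitNbrs (pvNbrs graph u) R nf).1 (pvVisitNbrs (pvNbrs graph u) R nf).2
    refine ⟨fun x hx => d1 x (c1 x hx), fun w hw y hy => ?_, fun x hx => d3 x (c3 x hx),
      fun x hx => ?_, fun x hx => ?_, fun x hx => ?_, fun x hx => ?_⟩
    · rcases List.mem_cons.mp hw with rfl | hw'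
      · exact d1 y (c2 y hy)
      · exact d2 w hw' y hy
    · rcases d4 x hx with h | h
      · rcases c4 x h with h' | h'
        · exact Or.inl h'
        · exact Or.inr ⟨u, List.mem_cons_self, h'⟩
      · obtain ⟨w, hw, hx'⟩ := h
        exact Or.inr ⟨w, List.mem_cons_of_mem _ hw, hx'⟩
    · rcases d5 x hx with h | h
      · rcases c5 x h with h' | h'
        · exact Or.inl h'
        · exact Or.inr (d3 x h')
      · exact Or.inr h
    · rcases d6 x hx with h | h
      · rcases c6 x h with h' | h'
        · exact Or.inl h'
        · exact Or.inr (d1 x h')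
      · exact Or.inr h
    · rcases d7 x hx with h | h
      · exact c7 x h
      · exact Or.inr fun hxR => h (c1 x hxR)

lemma pvLoopB_nil (graph : List (Int × List Int)) : ∀ (f : Nat) (R : PySem.Set Int),
    pvLoopB graph f [] R = R := by
  intro f R; cases f <;> simp [pvLoopB]

lemma pvLoopB_spec (graph : List (Int × List Int)) (start : Int) :
    ∀ (f : Nat) (frontier : List Int) (R : PySem.Set Int),
    pvRem graph start R < f →
    (∀ x ∈ frontier, x ∈ R) →
    (∀ x ∈ R, x ∉ frontier → ∀ y ∈ pvNbrs graph x, y ∈ R) →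
    (∀ x ∈ R, pvReach graph start x) →
    (∀ x ∈ R, x ∈ pvUniv graph start) →
    (∀ x ∈ R, x ∈ pvLoopB graph f frontier R) ∧
    (∀ x ∈ pvLoopB graph f frontier R, pvReach graph start x) ∧
    (∀ x ∈ pvLoopB graph f frontier R, ∀ y ∈ pvNbrs graph x, y ∈ pvLoopB graph f frontier R) := by
  intro f
  induction f with
  | zero =>
    intro frontier R hf
    exact absurd hf (Nat.not_lt_zero _)
  | succ f ih =>
    intro frontier R hf h1 h2 h3 h4
    by_cases hfr : frontier = []
    · subst hfr
      rw [pvLoopB_nil]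
      exact ⟨fun x hx => hx, h3, fun x hx => h2 x hx (by simp)⟩
    · simp only [pvLoopB, if_neg hfr]
      obtain ⟨d1, d2, d3, d4, d5, d6, d7⟩ := pvVisitRound_spec graph frontier R []
      have h1' : ∀ x ∈ (pvVisitRound graph frontier R []).2,
          x ∈ (pvVisitRound graph frontier R []).1 := by
        intro x hx
        rcases d6 x hx with h | h
        · cases h
        · exact h
      have h2' : ∀ x ∈ (pvVisitRound graph frontier R []).1,
          x ∉ (pvVisitRound graph frontier R []).2 →
          ∀ y ∈ pvNbrs graph x, y ∈ (pvVisitRound graph frontier R []).1 := by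
        intro x hx hnx y hy
        have hxR : x ∈ R := by
          rcases d5 x hx with h | h
          · exact h
          · exact absurd h hnx
        by_cases hxf : x ∈ frontier
        · exact d2 x hxf y hy
        · exact d1 y (h2 x hxR hxf y hy)
      have h3' : ∀ x ∈ (pvVisitRound graph frontier R []).1, pvReach graph start x := by
        intro x hx
        rcases d4 x hx with h | ⟨u, hu, hx'⟩
        · exact h3 x h
        · exact Relation.ReflTransGen.tail (h3 u (h1 u hu)) hx'
      have h4' : ∀ x ∈ (pvVisitRound graph frontier R []).1, x ∈ pvUniv graph start := by
        intro x hx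
        rcases d4 x hx with h | ⟨u, hu, hx'⟩
        · exact h4 x h
        · exact pvNbrs_subset_univ graph start u x hx'
      by_cases hnf : (pvVisitRound graph frontier R []).2 = []
      · rw [hnf, pvLoopB_nil]
        exact ⟨fun x hx => d1 x hx, h3', fun x hx => h2' x hx (by simp [hnf])⟩
      · obtain ⟨x, hx⟩ := List.exists_mem_of_ne_nil _ hnf
        have hxR' : x ∈ (pvVisitRound graph frontier R []).1 := h1' x hx
        have hxnR : x ∉ R := by
          rcases d7 x hx with h | h
          · cases h
          · exact h
        have hf' : pvRem graph start (pvVisitRound graph frontier R []).1 < f := by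
          have := pvRem_lt graph start R (pvVisitRound graph frontier R []).1 x d1 hxR' hxnR (h4' x hxR')
          omega
        obtain ⟨e1, e2, e3⟩ := ih (pvVisitRound graph frontier R []).2
          (pvVisitRound graph frontier R []).1 hf' h1' h2' h3' h4'
        exact ⟨fun y hy => e1 y (d1 y hy), e2, e3⟩

lemma pvRem_empty_lt (graph : List (Int × List Int)) (start : Int) (V : PySem.Set Int) :
    pvRem graph start V < (pvUniv graph start).length + 1 := by
  have := List.countP_le_length (l := pvUniv graph start) (p := fun x => decide (x ∉ V))
  unfold pvRem; omega

lemma alt_some (graph : List (Int × List Int)) (start target : Int)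
    (h : pvReach graph start target) :
    dfs_search_graph_recursive_alt graph start target = some target := by
  obtain ⟨e1, e2, e3⟩ := pvLoopB_spec graph start ((pvUniv graph start).length + 1) [start]
    (PySem.Set.add PySem.Set.empty start) (pvRem_empty_lt graph start _)
    (fun x hx => (PySem.Set.mem_add _ _ _).mpr (Or.inr (by simpa using hx)))
    (fun x hx hnx => by
      rcases (PySem.Set.mem_add _ _ _).mp hx with h' | h'
      · simp [PySem.Set.empty] at h'
      · exact absurd (by simp [h']) hnx)
    (fun x hx => by
      rcases (PySem.Set.mem_add _ _ _).mp hx with h' | h'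
      · simp [PySem.Set.empty] at h'
      · exact h' ▸ Relation.ReflTransGen.refl)
    (fun x hx => by
      rcases (PySem.Set.mem_add _ _ _).mp hx with h' | h'
      · simp [PySem.Set.empty] at h'
      · exact h' ▸ start_mem_univ graph start)
  have hstart : start ∈ pvLoopB graph ((pvUniv graph start).length + 1) [start]
      (PySem.Set.add PySem.Set.empty start) :=
    e1 start ((PySem.Set.mem_add _ _ _).mpr (Or.inr rfl))
  have ht := reach_closed graph _ start target h hstart e3
  simp only [dfs_search_graph_recursive_alt]
  rw [if_pos ht]

lemma alt_none (graph : List (Int × List Int)) (start target : Int)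
    (h : ¬ pvReach graph start target) :
    dfs_search_graph_recursive_alt graph start target = none := by
  obtain ⟨e1, e2, e3⟩ := pvLoopB_spec graph start ((pvUniv graph start).length + 1) [start]
    (PySem.Set.add PySem.Set.empty start) (pvRem_empty_lt graph start _)
    (fun x hx => (PySem.Set.mem_add _ _ _).mpr (Or.inr (by simpa using hx)))
    (fun x hx hnx => by
      rcases (PySem.Set.mem_add _ _ _).mp hx with h' | h'
      · simp [PySem.Set.empty] at h'
      · exact absurd (by simp [h']) hnx)
    (fun x hx => by
      rcases (PySem.Set.mem_add _ _ _).mp hx with h' | h'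
      · simp [PySem.Set.empty] at h'
      · exact h' ▸ Relation.ReflTransGen.refl)
    (fun x hx => by
      rcases (PySem.Set.mem_add _ _ _).mp hx with h' | h'
      · simp [PySem.Set.empty] at h'
      · exact h' ▸ start_mem_univ graph start)
  have ht : target ∉ pvLoopB graph ((pvUniv graph start).length + 1) [start]
      (PySem.Set.add PySem.Set.empty start) :=
    fun hmem => h (e2 target hmem)
  simp only [dfs_search_graph_recursive_alt]
  rw [if_neg ht]

-- ===== VERDICT (by name: the statement is the Claim_ definition above) =====
theorem dfs_search_graph_recursive_spec : Claim_equal_dfs_search_graph_recursive := by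
  unfold Claim_equal_dfs_search_graph_recursive
  intro graph start target _
  unfold Spec_dfs_search_graph_recursive
  by_cases hR : pvReach graph start target
  · rw [alt_some graph start target hR]
    unfold dfs_search_graph_recursive
    rcases hA : pvDfsA graph target ((pvUniv graph start).length + 1) start PySem.Set.empty
      with ⟨ro, W⟩
    cases ro with
    | none =>
      exfalso
      obtain ⟨-, hstartW, htW, -, hcl⟩ :=
        pvDfsA_none ((pvUniv graph start).length + 1) graph start target start PySem.Set.empty W
          (pvRem_empty_lt graph start _) (start_mem_univ graph start)
          (by simp [PySem.Set.empty]) (by simp [PySem.Set.empty])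
          (fun x hx => by simp [PySem.Set.empty] at hx) hA
      exact htW (reach_closed graph W start target hR hstartW
        (fun v hv y hy => hcl v hv (by simp [PySem.Set.empty]) y hy))
    | some r =>
      obtain ⟨rfl, -⟩ :=
        pvDfsA_sound ((pvUniv graph start).length + 1) graph target start PySem.Set.empty W r hA
      rfl
  · rw [alt_none graph start target hR]
    unfold dfs_search_graph_recursive
    rcases hA : pvDfsA graph target ((pvUniv graph start).length + 1) start PySem.Set.empty
      with ⟨ro, W⟩
    cases ro with
    | none => rfl
    | some r =>
      exfalso
      obtain ⟨-, hreach⟩ :=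
        pvDfsA_sound ((pvUniv graph start).length + 1) graph target start PySem.Set.empty W r hA
      exact hR hreach
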